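-- pv_equiv track=rewrite | github.com/poshakjaiswal/python_algorithms | prices.py | totalLuckyCustomer
-- ===== SOURCE A (Python) =====
-- def totalLuckyCustomer(list_input, K):
--     prices = set(list_input)
--     memoize = {}
--
--     def savePreviousStates(price):
--
--         if price in memoize:
--             return memoize[price]
--
--         count = 0
--
--         if price - K in prices:
--             count += 1
--
--         memoize[price] = count
--
--         return count
--
--     total_count = 0
--
--     for price in list_input:
--         total_count += savePreviousStates(price)
--
--     # Write your code here
--
--     return total_count
-- ===== SOURCE B (Python) =====
-- def totalLuckyCustomer(list_input, K):
--     # Sort once, then a single two-pointer merge scan over the sorted prices: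
--     # targets x-K are nondecreasing, so one forward pointer j finds each
--     # predecessor without any hash set or memo dict.
--     xs = sorted(list_input)
--     n = len(xs)
--     total = 0
--     j = 0
--     for x in xs:
--         t = x - K
--         while j < n and xs[j] < t:
--             j += 1
--         if j < n and xs[j] == t:
--             total += 1
--     return total
-- ===== Notes on version B (the rewrite author's own statement) =====
-- stated objective: alternative
-- what changed: Replaces the hash-based per-element test (set + memo dict) by sort-then-two-pointer: sort the prices once and sweep a single forward pointer over the sorted list to match each nondecreasing target x-K, so no hash structures and no per-element membership test remain.
import Mathlib
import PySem

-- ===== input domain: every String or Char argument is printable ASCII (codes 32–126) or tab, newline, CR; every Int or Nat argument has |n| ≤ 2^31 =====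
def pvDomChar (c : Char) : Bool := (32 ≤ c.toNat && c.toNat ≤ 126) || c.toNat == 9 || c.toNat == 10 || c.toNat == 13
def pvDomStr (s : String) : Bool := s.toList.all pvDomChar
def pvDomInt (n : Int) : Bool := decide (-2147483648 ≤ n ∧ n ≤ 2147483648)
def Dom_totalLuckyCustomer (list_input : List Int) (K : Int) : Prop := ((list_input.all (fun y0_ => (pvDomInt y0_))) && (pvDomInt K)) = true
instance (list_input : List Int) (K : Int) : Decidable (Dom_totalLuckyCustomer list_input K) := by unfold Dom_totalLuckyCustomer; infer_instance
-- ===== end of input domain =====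

-- B replaces A's hash set + memo dict by sort-then-two-pointer: one forward pointer
-- sweeps the sorted prices to match each nondecreasing target x-K (objective: alternative).

-- ===== PORT A =====
-- savePreviousStates: takes the memo dict and a price, returns (updated memo, count)
def pvSavePreviousStates (prices : PySem.Set Int) (K : Int)
    (memoize : PySem.Dict Int Int) (price : Int) : PySem.Dict Int Int × Int :=
  match memoize.get? price with
  | some c => (memoize, c)
  | none =>
    let count : Int := 0
    let count : Int := if PySem.Set.contains prices (price - K) then count + 1 else count
    (memoize.insert price count, count)

def totalLuckyCustomer (list_input : List Int) (K : Int) : Int :=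
  let prices : PySem.Set Int := PySem.Set.ofList list_input
  let st := list_input.foldl
    (fun (s : PySem.Dict Int Int × Int) (price : Int) =>
      let r := pvSavePreviousStates prices K s.1 price
      (r.1, s.2 + r.2))
    (PySem.Dict.empty, 0)
  st.2

-- ===== PORT B =====
-- the inner 'while j < n and xs[j] < t: j += 1' loop of Source B
def pvAdvance (xs : List Int) (t : Int) (j : Nat) : Nat :=
  if h : j < xs.length ∧ xs.getD j 0 < t then pvAdvance xs t (j + 1) else j
termination_by xs.length - j
decreasing_by omega

def totalLuckyCustomer_alt (list_input : List Int) (K : Int) : Int :=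
  let xs := PySem.List.sorted list_input (fun x => x) false
  (xs.foldl
    (fun (s : Nat × Int) (x : Int) =>
      let j := pvAdvance xs (x - K) s.1
      (j, if j < xs.length ∧ xs.getD j 0 = x - K then s.2 + 1 else s.2))
    (0, 0)).2

-- ===== PRECONDITION & SPEC =====
def Spec_totalLuckyCustomer (list_input : List Int) (K : Int) (out : Int) : Prop := out = totalLuckyCustomer_alt list_input K
instance (list_input : List Int) (K : Int) (out : Int) : Decidable (Spec_totalLuckyCustomer list_input K out) := by unfold Spec_totalLuckyCustomer; infer_instance

-- ===== CLAIM (what is proved, stated in full; the proofs are below) =====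
def Claim_equal_totalLuckyCustomer : Prop := ∀ (list_input : List Int) (K : Int), Dom_totalLuckyCustomer list_input K → Spec_totalLuckyCustomer list_input K (totalLuckyCustomer list_input K)

-- ===== LEMMAS AND PROOFS =====

-- A's loop: the memo dict only ever stores the indicator value, so the running total
-- just accumulates the indicator of each element.
theorem pvA_loop (prices : PySem.Set Int) (K : Int) (l : List Int)
    (d : PySem.Dict Int Int) (t : Int)
    (hd : ∀ p c, d.get? p = some c → c = (if PySem.Set.contains prices (p - K) then (1:Int) else 0)) :
    (l.foldl (fun (s : PySem.Dict Int Int × Int) (price : Int) =>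
      let r := pvSavePreviousStates prices K s.1 price
      (r.1, s.2 + r.2)) (d, t)).2
    = t + (l.map (fun p => if PySem.Set.contains prices (p - K) then (1:Int) else 0)).sum := by
  induction l generalizing d t with
  | nil => simp
  | cons x xs ih =>
    simp only [List.foldl_cons, List.map_cons, List.sum_cons]
    cases hx : d.get? x with
    | some c =>
      have hstep : pvSavePreviousStates prices K d x = (d, c) := by
        unfold pvSavePreviousStates; rw [hx]
      simp only [hstep]
      rw [ih d (t + c) hd, hd x c hx]; ring
    | none =>
      have hstep : pvSavePreviousStates prices K d x =
          (d.insert x (if PySem.Set.contains prices (x - K) then (1:Int) else 0),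
           if PySem.Set.contains prices (x - K) then (1:Int) else 0) := by
        unfold pvSavePreviousStates; rw [hx]; split_ifs <;> norm_num
      have hins : ∀ p c, (d.insert x (if PySem.Set.contains prices (x - K) then (1:Int) else 0)).get? p = some c →
          c = (if PySem.Set.contains prices (p - K) then (1:Int) else 0) := by
        intro p c hc
        by_cases hpx : x = p
        · subst hpx
          simp only [PySem.Dict.get?_insert_self] at hc
          exact (Option.some.inj hc).symm
        · rw [PySem.Dict.get?_insert_of_ne] at hc
          · exact hd p c hc
          · simpa using Ne.symm hpx
      simp only [hstep]
      rw [ih _ _ hins]; ring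

-- the common value: A computes the number of prices whose predecessor is present
theorem pvA_eq_countP (list_input : List Int) (K : Int) :
    totalLuckyCustomer list_input K
    = (list_input.countP (fun p => decide ((p - K) ∈ list_input)) : Int) := by
  unfold totalLuckyCustomer
  rw [pvA_loop (PySem.Set.ofList list_input) K list_input PySem.Dict.empty 0
      (by intro p c hc; simp [PySem.Dict.empty] at hc; cases hc)]
  rw [PySem.List.sum_map_ite_one_zero]
  simp [pysem]

-- pvAdvance preserves 'every index below the pointer holds a value < t'
theorem pvAdvance_prefix (xs : List Int) (t : Int) (j : Nat)
    (h : ∀ i, i < j → xs.getD i 0 < t) :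
    ∀ i, i < pvAdvance xs t j → xs.getD i 0 < t := by
  unfold pvAdvance
  split
  · rename_i hc
    exact pvAdvance_prefix xs t (j + 1)
      (by intro i hi
          rcases Nat.lt_succ_iff_lt_or_eq.mp hi with h' | h'
          · exact h i h'
          · subst h'; exact hc.2)
  · exact h
termination_by xs.length - j
decreasing_by rename_i hc; omega

-- pvAdvance stops at an index whose value is not < t (or at the end)
theorem pvAdvance_stop (xs : List Int) (t : Int) (j : Nat) :
    pvAdvance xs t j < xs.length → ¬ xs.getD (pvAdvance xs t j) 0 < t := by
  unfold pvAdvance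
  split
  · exact pvAdvance_stop xs t (j + 1)
  · rename_i hc
    intro hlt hval
    exact hc ⟨hlt, hval⟩
termination_by xs.length - j
decreasing_by rename_i hc; omega

-- for a sorted list, the two-pointer check at the stopped pointer decides membership
theorem pvIndicator (xs : List Int) (hs : xs.Pairwise (· ≤ ·)) (t : Int) (j : Nat)
    (hpre : ∀ i, i < j → xs.getD i 0 < t)
    (hge : j < xs.length → ¬ xs.getD j 0 < t) :
    ((j < xs.length ∧ xs.getD j 0 = t) ↔ t ∈ xs) := by
  constructor
  · rintro ⟨hj, he⟩
    rw [List.getD_eq_getElem xs 0 hj] at he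
    exact he ▸ List.getElem_mem hj
  · intro hmem
    obtain ⟨i0, hi0, he0⟩ := List.mem_iff_getElem.mp hmem
    have hji0 : j ≤ i0 := by
      by_contra hlt
      have := hpre i0 (Nat.lt_of_not_le hlt)
      rw [List.getD_eq_getElem xs 0 hi0, he0] at this
      exact lt_irrefl t this
    have hjlen : j < xs.length := Nat.lt_of_le_of_lt hji0 hi0
    refine ⟨hjlen, ?_⟩
    have hge' := hge hjlen
    rw [List.getD_eq_getElem xs 0 hjlen] at hge' ⊢
    rcases Nat.lt_or_eq_of_le hji0 with hlt | heq
    · have hle : xs[j] ≤ xs[i0] := (List.pairwise_iff_getElem.mp hs) j i0 hjlen hi0 hlt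
      rw [he0] at hle
      omega
    · subst heq; rw [he0]
  
-- the invariant proof of B's single sweep: it accumulates the membership count
theorem pvB_loop (xs : List Int) (K : Int) (hxs : xs.Pairwise (· ≤ ·)) :
    ∀ (l : List Int), l.Pairwise (· ≤ ·) → ∀ (j : Nat) (tot : Int),
    (∀ i, i < j → ∀ x ∈ l, xs.getD i 0 < x - K) →
    (l.foldl
      (fun (s : Nat × Int) (x : Int) =>
        let jj := pvAdvance xs (x - K) s.1
        (jj, if jj < xs.length ∧ xs.getD jj 0 = x - K then s.2 + 1 else s.2))
      (j, tot)).2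
    = tot + (l.countP (fun x => decide ((x - K) ∈ xs)) : Int) := by
  intro l
  induction l with
  | nil => intro _ j tot _; simp
  | cons x r ih =>
    intro hl j tot hinv
    rw [List.foldl_cons]
    have hpre : ∀ i, i < j → xs.getD i 0 < x - K := by
      intro i hi; exact hinv i hi x (List.mem_cons_self ..)
    have hpre' : ∀ i, i < pvAdvance xs (x - K) j → xs.getD i 0 < x - K :=
      pvAdvance_prefix xs (x - K) j hpre
    have hind := pvIndicator xs hxs (x - K) (pvAdvance xs (x - K) j) hpre'
      (pvAdvance_stop xs (x - K) j)
    have hxr : ∀ y ∈ r, x ≤ y := (List.pairwise_cons.mp hl).1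
    have hl' : r.Pairwise (· ≤ ·) := (List.pairwise_cons.mp hl).2
    have hinv' : ∀ i, i < pvAdvance xs (x - K) j → ∀ y ∈ r, xs.getD i 0 < y - K := by
      intro i hi y hy
      have h1 := hpre' i hi
      have h2 := hxr y hy
      omega
    refine (ih hl' (pvAdvance xs (x - K) j)
      (if pvAdvance xs (x - K) j < xs.length ∧ xs.getD (pvAdvance xs (x - K) j) 0 = x - K
       then tot + 1 else tot) hinv').trans ?_
    rw [List.countP_cons]
    by_cases hm : (x - K) ∈ xs
    · rw [if_pos (hind.mpr hm)]
      have hd : decide ((x - K) ∈ xs) = true := by simpa using hm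
      rw [hd]
      norm_num
      omega
    · rw [if_neg (fun hc => hm (hind.mp hc))]
      have hd : decide ((x - K) ∈ xs) = false := by simpa using hm
      rw [hd]
      norm_num

theorem pvB_eq_countP (list_input : List Int) (K : Int) :
    totalLuckyCustomer_alt list_input K
    = (list_input.countP (fun p => decide ((p - K) ∈ list_input)) : Int) := by
  unfold totalLuckyCustomer_alt
  have hsorted : (PySem.List.sorted list_input (fun x => x) false).Pairwise (· ≤ ·) := by
    simpa using PySem.List.sorted_pairwise list_input (fun x => x)
  rw [pvB_loop (PySem.List.sorted list_input (fun x => x) false) K hsorted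
      (PySem.List.sorted list_input (fun x => x) false) hsorted 0 0
      (by intro i hi; omega)]
  have hperm : (PySem.List.sorted list_input (fun x => x) false).Perm list_input :=
    PySem.List.sorted_perm list_input (fun x => x) false
  have hfun : (fun x : Int => decide ((x - K) ∈ PySem.List.sorted list_input (fun x => x) false))
      = (fun x : Int => decide ((x - K) ∈ list_input)) := by
    funext y
    simp [PySem.List.mem_sorted]
  rw [hfun, hperm.countP_eq]
  ring

-- ===== VERDICT (by name: the statement is the Claim_ definition above) =====
theorem totalLuckyCustomer_spec : Claim_equal_totalLuckyCustomer := by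
  intro list_input K _
  unfold Spec_totalLuckyCustomer
  rw [pvA_eq_countP, pvB_eq_countP]
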